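-- pv_equiv track=rewrite | github.com/AlbertoV5/Reaper-Scripts | LinkParameters/_linkParameters.py | addProgramEnvs
-- ===== SOURCE A (Python) =====
-- fxRange = (0,16)
--
-- fxParamRange = (0,999)
--
-- def defineProgramEnv(fxParamIndex, fxPosition):
--
--     programEnv = "<PROGRAMENV "+ str(fxParamIndex) + ":" + str(fxParamIndex) + " 0\nPARAMBASE 0\nLFO 0\nLFOWT 1 1\nAUDIOCTL 0\nAUDIOCTLWT 1 1\nPLINK 1 "
--     programEnv = programEnv + str(0) + ":" + str(-fxPosition) + " "
--
--     return programEnv + str(fxParamIndex) + ":" + str(fxParamIndex) + " 0\nMODWND 0 232 146 580 423\n>\n"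
--
-- def insertLineInString(fxString, index, newLine):
--
--     array = [i for i in fxString.split("\n")]
--     array.insert(index, newLine)
--
--     fxStringNew = ""
--     for i in array:
--         fxStringNew += i + "\n"
--
--     return fxStringNew[0:-1]
--
-- def addProgramEnvs(fxString, fxPosition):
--
--     if fxPosition == fxRange[0] or fxPosition >= fxRange[1]:
--         return fxString
--
--     programEnvs = ""
--     for i in range(fxParamRange[0], fxParamRange[1]):
--         programEnvs += defineProgramEnv(i, fxPosition)
--
--     if fxString[-2] == ">":
--         return insertLineInString(fxString, -3, programEnvs[0:-1])
--
--     return insertLineInString(fxString, -2, programEnvs[0:-1])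
-- ===== SOURCE B (Python) =====
-- def addProgramEnvs(fxString, fxPosition):
--     if fxPosition == 0 or fxPosition >= 16:
--         return fxString
--     block = "\n".join(
--         "<PROGRAMENV " + str(i) + ":" + str(i) + " 0\nPARAMBASE 0\nLFO 0\nLFOWT 1 1\n"
--         "AUDIOCTL 0\nAUDIOCTLWT 1 1\nPLINK 1 0:" + str(-fxPosition) + " "
--         + str(i) + ":" + str(i) + " 0\nMODWND 0 232 146 580 423\n>"
--         for i in range(999))
--     m = 3 if fxString[-2] == ">" else 2
--     # locate the m-th newline counted from the end by one backward character scan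
--     count = 0
--     j = len(fxString) - 1
--     while j >= 0:
--         if fxString[j] == "\n":
--             count += 1
--             if count == m:
--                 return fxString[:j] + "\n" + block + "\n" + fxString[j + 1:]
--         j -= 1
--     return block + "\n" + fxString
-- ===== Notes on version B (the rewrite author's own statement) =====
-- stated objective: alternative
-- what changed: B never builds A's list of lines: it finds the insertion point with a single backward character scan (the m-th newline counted from the end, m = 3 or 2) and splices head + block + tail by direct string slicing, while A splits the whole string into a line list, list.insert's at a negative index and rejoins with an accumulation loop; the env block is built with one "\n".join instead of A's per-env += loop.
import Mathlib
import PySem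

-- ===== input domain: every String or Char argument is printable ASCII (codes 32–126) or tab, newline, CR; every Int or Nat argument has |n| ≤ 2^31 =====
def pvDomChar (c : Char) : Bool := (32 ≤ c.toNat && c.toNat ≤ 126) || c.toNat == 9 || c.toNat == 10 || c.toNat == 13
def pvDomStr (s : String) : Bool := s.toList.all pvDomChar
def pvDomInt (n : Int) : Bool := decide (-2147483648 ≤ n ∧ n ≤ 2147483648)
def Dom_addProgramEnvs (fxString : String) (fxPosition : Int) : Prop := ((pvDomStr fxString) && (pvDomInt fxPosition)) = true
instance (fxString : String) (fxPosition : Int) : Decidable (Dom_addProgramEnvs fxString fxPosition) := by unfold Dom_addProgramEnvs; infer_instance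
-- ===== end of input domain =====

-- B replaces A's split-into-list / negative-index insert / rejoin-loop with a single backward
-- character scan locating the m-th newline from the end, then splices by direct slicing
-- (alternative decomposition; same behaviour, including raising on the short strings excluded by Pre_).

-- ===== PORT A =====
def fxRange : Int × Int := (0, 16)
def fxParamRange : Int × Int := (0, 999)

def defineProgramEnv (fxParamIndex : Int) (fxPosition : Int) : String :=
  let programEnv := "<PROGRAMENV " ++ PySem.Int.toStr fxParamIndex ++ ":" ++ PySem.Int.toStr fxParamIndex ++ " 0\nPARAMBASE 0\nLFO 0\nLFOWT 1 1\nAUDIOCTL 0\nAUDIOCTLWT 1 1\nPLINK 1 "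
  let programEnv := programEnv ++ PySem.Int.toStr 0 ++ ":" ++ PySem.Int.toStr (-fxPosition) ++ " "
  programEnv ++ PySem.Int.toStr fxParamIndex ++ ":" ++ PySem.Int.toStr fxParamIndex ++ " 0\nMODWND 0 232 146 580 423\n>\n"

def insertLineInString (fxString : String) (index : Int) (newLine : String) : String :=
  -- fxString.split("\n"): the separator is the nonempty literal "\n", so Chars.splitOn is exact
  let array := (PySem.Chars.splitOn fxString.toList "\n".toList).map String.ofList
  let array := PySem.List.insert array index newLine
  let fxStringNew := array.foldl (fun acc i => acc ++ i ++ "\n") ""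
  PySem.Str.slice fxStringNew none (some (-1))

def addProgramEnvs (fxString : String) (fxPosition : Int) : String :=
  if fxPosition == fxRange.1 || fxPosition ≥ fxRange.2 then fxString
  else
    let programEnvs := (PySem.List.pyRange fxParamRange.1 fxParamRange.2 1).foldl
      (fun acc i => acc ++ defineProgramEnv i fxPosition) ""
    match PySem.Str.pyGet? fxString (-2) with
    | some c =>
        if c = '>' then insertLineInString fxString (-3) (PySem.Str.slice programEnvs none (some (-1)))
        else insertLineInString fxString (-2) (PySem.Str.slice programEnvs none (some (-1)))
    | none => fxString   -- fxString[-2] raises IndexError in Python: excluded by Pre_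

-- ===== PORT B =====
def envLine (i : Int) (fxPosition : Int) : String :=
  "<PROGRAMENV " ++ PySem.Int.toStr i ++ ":" ++ PySem.Int.toStr i ++ " 0\nPARAMBASE 0\nLFO 0\nLFOWT 1 1\nAUDIOCTL 0\nAUDIOCTLWT 1 1\nPLINK 1 " ++ PySem.Int.toStr 0 ++ ":" ++ PySem.Int.toStr (-fxPosition) ++ " " ++ PySem.Int.toStr i ++ ":" ++ PySem.Int.toStr i ++ " 0\nMODWND 0 232 146 580 423\n>"

-- Source B's backward while loop over fxString, as a recursion over the reversed char list:
-- cnt counts newlines seen so far; on the m-th newline, t.length is the loop's index j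
def findSplit : List Char → Nat → Nat → Option Nat
  | [], _, _ => none
  | c :: t, cnt, m =>
    if c = '\n' then
      if cnt + 1 = m then some t.length
      else findSplit t (cnt + 1) m
    else findSplit t cnt m

def addProgramEnvs_alt (fxString : String) (fxPosition : Int) : String :=
  if fxPosition == 0 || fxPosition ≥ 16 then fxString
  else
    let block := PySem.Str.join "\n" ((PySem.List.pyRange 0 999 1).map (fun i => envLine i fxPosition))
    -- fxString[-2] == ">": pyGet? is none exactly where Python raises IndexError (excluded by Pre_)
    let m : Nat := if PySem.Str.pyGet? fxString (-2) = some '>' then 3 else 2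
    match findSplit fxString.toList.reverse 0 m with
    | some j =>
        -- 0 ≤ j < len, so fxString[:j] / fxString[j+1:] are exactly take j / drop (j+1)
        String.ofList (fxString.toList.take j) ++ "\n" ++ block ++ "\n" ++ String.ofList (fxString.toList.drop (j + 1))
    | none => block ++ "\n" ++ fxString

-- ===== PRECONDITION & SPEC =====
-- Pre_ excludes exactly the inputs where Python's fxString[-2] raises IndexError (in A and in B
-- alike): strings of length < 2 that get past the range guard.
def Pre_addProgramEnvs (fxString : String) (fxPosition : Int) : Prop :=
  fxPosition = 0 ∨ 16 ≤ fxPosition ∨ 2 ≤ fxString.toList.length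
instance (fxString : String) (fxPosition : Int) : Decidable (Pre_addProgramEnvs fxString fxPosition) := by unfold Pre_addProgramEnvs; infer_instance

def pvWitness_addProgramEnvs : String × Int := ("WAK\n>\n>\n", 5)

def Spec_addProgramEnvs (fxString : String) (fxPosition : Int) (out : String) : Prop := out = addProgramEnvs_alt fxString fxPosition
instance (fxString : String) (fxPosition : Int) (out : String) : Decidable (Spec_addProgramEnvs fxString fxPosition out) := by unfold Spec_addProgramEnvs; infer_instance

-- ===== CLAIM (what is proved, stated in full; the proofs are below) =====
def Claim_equal_addProgramEnvs : Prop := ∀ (fxString : String) (fxPosition : Int), Dom_addProgramEnvs fxString fxPosition → Pre_addProgramEnvs fxString fxPosition → Spec_addProgramEnvs fxString fxPosition (addProgramEnvs fxString fxPosition)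

-- ===== LEMMAS AND PROOFS =====

-- reference line-splitter: what split-on-"\n" computes, in structural form
def splitNl : List Char → List (List Char)
  | [] => [[]]
  | c :: t => if c = '\n' then [] :: splitNl t else (splitNl t).modifyHead (c :: ·)

theorem splitNl_ne_nil (L : List Char) : splitNl L ≠ [] := by
  induction L with
  | nil => simp [splitNl]
  | cons c t ih =>
    simp only [splitNl]
    split
    · simp
    · cases h : splitNl t with
      | nil => exact absurd h ih
      | cons a b => simp [List.modifyHead]

theorem splitOn_go_eq (l : List Char) : ∀ (fuel : Nat) (cur : List Char) (acc : List (List Char)),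
    l.length ≤ fuel →
    PySem.Chars.splitOn.go ['\n'] fuel l cur acc
      = acc.reverse ++ (splitNl l).modifyHead (cur.reverse ++ ·) := by
  induction l with
  | nil =>
    intro fuel cur acc _
    cases fuel <;> simp [PySem.Chars.splitOn.go, splitNl, List.modifyHead]
  | cons c t ih =>
    intro fuel cur acc hf
    cases fuel with
    | zero => simp at hf
    | succ f =>
      rw [PySem.Chars.splitOn.go.eq_def]
      simp only []
      by_cases hc : c = '\n'
      · subst hc
        rw [if_pos (by simp [List.isPrefixOf])]
        rw [show List.drop (['\n'].length) ('\n' :: t) = t from rfl]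
        rw [ih f [] (cur.reverse :: acc) (by simpa using hf)]
        simp [splitNl, List.modifyHead]
        cases splitNl t <;> rfl
      · rw [if_neg (by simp [List.isPrefixOf]; exact fun h => hc h.symm)]
        rw [ih f (c :: cur) acc (by simpa using hf)]
        simp only [splitNl, if_neg hc]
        cases h : splitNl t with
        | nil => exact absurd h (splitNl_ne_nil t)
        | cons x xs => simp [List.modifyHead]

theorem splitOn_eq_splitNl (L : List Char) : PySem.Chars.splitOn L ['\n'] = splitNl L := by
  rw [show PySem.Chars.splitOn L ['\n'] = PySem.Chars.splitOn.go ['\n'] (L.length + 1) L [] [] from rfl]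
  rw [splitOn_go_eq L (L.length + 1) [] [] (Nat.le_succ _)]
  cases h : splitNl L with
  | nil => exact absurd h (splitNl_ne_nil L)
  | cons x xs => simp [List.modifyHead]

theorem join_modifyHead (sep p : List Char) (xs : List (List Char)) (h : xs ≠ []) :
    PySem.Chars.join sep (xs.modifyHead (p ++ ·)) = p ++ PySem.Chars.join sep xs := by
  cases xs with
  | nil => exact absurd rfl h
  | cons a t =>
    cases t with
    | nil => simp [List.modifyHead, PySem.Chars.join_singleton]
    | cons b t' => simp [List.modifyHead, PySem.Chars.join_cons_cons, List.append_assoc]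

theorem join_splitNl (L : List Char) : PySem.Chars.join ['\n'] (splitNl L) = L := by
  induction L with
  | nil => simp [splitNl, PySem.Chars.join_singleton]
  | cons c t ih =>
    simp only [splitNl]
    split
    · rename_i hc
      subst hc
      cases h : splitNl t with
      | nil => exact absurd h (splitNl_ne_nil t)
      | cons a b => rw [h] at ih; simp [PySem.Chars.join_cons_cons, ih]
    · rw [show List.modifyHead (fun x => c :: x) (splitNl t)
            = (splitNl t).modifyHead (([c] : List Char) ++ ·) from rfl,
          join_modifyHead ['\n'] [c] (splitNl t) (splitNl_ne_nil t), ih]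
      rfl

theorem join_append (sep : List Char) (xs ys : List (List Char)) (hx : xs ≠ []) (hy : ys ≠ []) :
    PySem.Chars.join sep (xs ++ ys) = PySem.Chars.join sep xs ++ sep ++ PySem.Chars.join sep ys := by
  induction xs with
  | nil => exact absurd rfl hx
  | cons a t ih =>
    cases t with
    | nil =>
      cases ys with
      | nil => exact absurd rfl hy
      | cons b u => simp [PySem.Chars.join_singleton, PySem.Chars.join_cons_cons, List.append_assoc]
    | cons a' t' =>
      simp only [List.cons_append, PySem.Chars.join_cons_cons]
      rw [List.cons_append] at ih
      rw [ih (by simp)]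
      simp [List.append_assoc]

-- reference last-newline splitter used to decompose both programs
def lastSplitNl : List Char → Option (List Char × List Char)
  | [] => none
  | c :: t =>
    match lastSplitNl t with
    | some (a, b) => some (c :: a, b)
    | none => if c = '\n' then some ([], t) else none

theorem lastSplitNl_none_notMem (L : List Char) (h : lastSplitNl L = none) : '\n' ∉ L := by
  induction L with
  | nil => simp
  | cons c t ih =>
    simp only [lastSplitNl] at h
    cases ht : lastSplitNl t with
    | some p => rw [ht] at h; rcases p with ⟨a, b⟩; simp at h
    | none =>
      rw [ht] at h
      by_cases hc : c = '\n'
      · simp [hc] at h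
      · simp [hc] at h ⊢
        exact ⟨fun hx => hc hx.symm, ih ht⟩

theorem splitNl_of_notMem (L : List Char) (h : '\n' ∉ L) : splitNl L = [L] := by
  induction L with
  | nil => rfl
  | cons c t ih =>
    simp only [List.mem_cons, not_or] at h
    have hc : ¬ c = '\n' := fun e => h.1 e.symm
    simp [splitNl, hc, ih h.2, List.modifyHead]

theorem lastSplitNl_some (L : List Char) :
    ∀ a b, lastSplitNl L = some (a, b) → L = a ++ '\n' :: b ∧ '\n' ∉ b := by
  induction L with
  | nil => intro a b h; simp [lastSplitNl] at h
  | cons c t ih =>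
    intro a b h
    simp only [lastSplitNl] at h
    cases ht : lastSplitNl t with
    | some p =>
      rcases p with ⟨a', b'⟩
      rw [ht] at h
      simp at h
      obtain ⟨ha, hb⟩ := h
      obtain ⟨ht1, ht2⟩ := ih a' b' ht
      subst ha hb
      exact ⟨by rw [ht1]; rfl, ht2⟩
    | none =>
      rw [ht] at h
      by_cases hc : c = '\n'
      · simp [hc] at h
        obtain ⟨ha, hb⟩ := h
        subst ha hb
        exact ⟨by rw [hc]; rfl, lastSplitNl_none_notMem t ht⟩
      · simp [hc] at h

theorem splitNl_append (a b : List Char) (hb : '\n' ∉ b) :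
    splitNl (a ++ '\n' :: b) = splitNl a ++ [b] := by
  induction a with
  | nil => simp [splitNl, splitNl_of_notMem b hb]
  | cons c t ih =>
    by_cases hc : c = '\n'
    · subst hc
      simp only [List.cons_append, splitNl, reduceIte, ih]
    · simp only [List.cons_append, splitNl, if_neg hc, ih]
      cases h : splitNl t with
      | nil => exact absurd h (splitNl_ne_nil t)
      | cons x xs => simp [List.modifyHead]

-- the backward scan skips a newline-free suffix unchanged
theorem findSplit_skip (b : List Char) (hb : '\n' ∉ b) : ∀ (rest : List Char) (c m : Nat),
    findSplit (b ++ rest) c m = findSplit rest c m := by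
  induction b with
  | nil => intro rest c m; rfl
  | cons x t ih =>
    intro rest c m
    simp only [List.mem_cons, not_or] at hb
    have hx : ¬ x = '\n' := fun e => hb.1 e.symm
    simp [findSplit, hx, ih hb.2]

theorem findSplit_shift (rev : List Char) : ∀ (c m : Nat), c < m →
    findSplit rev c m = findSplit rev 0 (m - c) := by
  induction rev with
  | nil => intro c m _; rfl
  | cons x t ih =>
    intro c m hc
    by_cases hx : x = '\n'
    · subst hx
      simp only [findSplit, reduceIte, Nat.zero_add]
      by_cases he : c + 1 = m
      · rw [if_pos he, if_pos (by omega)]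
      · rw [if_neg he, if_neg (by omega)]
        rw [ih (c + 1) m (by omega), ih 1 (m - c) (by omega)]
        congr 1
    · simp only [findSplit, if_neg hx]
      exact ih c m hc

-- characterization of the backward scan: the found index is the length of the rejoined head
theorem findSplit_eq (m : Nat) (hm : 1 ≤ m) : ∀ (L : List Char),
    findSplit L.reverse 0 m =
      if (splitNl L).length ≤ m then none
      else some (PySem.Chars.join ['\n'] ((splitNl L).take ((splitNl L).length - m))).length := by
  induction m with
  | zero => omega
  | succ m ih =>
    intro L
    cases h : lastSplitNl L with
    | none =>
      have hnm := lastSplitNl_none_notMem L h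
      have : findSplit L.reverse 0 (m + 1) = none := by
        rw [show L.reverse = L.reverse ++ [] from by simp,
            findSplit_skip L.reverse (by simpa using hnm)]
        rfl
      rw [this, splitNl_of_notMem L hnm]
      simp
    | some p =>
      rcases p with ⟨a, b⟩
      obtain ⟨hL, hb⟩ := lastSplitNl_some L a b h
      subst hL
      have hrev : (a ++ '\n' :: b).reverse = b.reverse ++ '\n' :: a.reverse := by simp
      rw [hrev, findSplit_skip b.reverse (by simpa using hb)]
      rw [splitNl_append a b hb]
      set Pa := splitNl a with hPa
      have hna : Pa.length ≠ 0 := by simpa [List.length_eq_zero_iff] using splitNl_ne_nil a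
      simp only [findSplit, reduceIte, Nat.zero_add]
      by_cases hm1 : m = 0
      · subst hm1
        rw [if_pos rfl]
        rw [if_neg (by simp only [List.length_append, List.length_cons, List.length_nil]; omega)]
        have hk : (Pa ++ [b]).length - 1 = Pa.length := by simp only [List.length_append, List.length_cons, List.length_nil]; omega
        rw [hk, List.take_append_of_le_length (le_refl _), List.take_length, hPa, join_splitNl]
        simp
      · rw [if_neg (by omega)]
        rw [findSplit_shift a.reverse 1 (m + 1) (by omega)]
        rw [show m + 1 - 1 = m from rfl]
        rw [ih (by omega) a, ← hPa]
        by_cases hle : Pa.length ≤ m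
        · rw [if_pos hle, if_pos (by simp only [List.length_append, List.length_cons, List.length_nil]; omega)]
        · rw [if_neg hle, if_neg (by simp only [List.length_append, List.length_cons, List.length_nil]; omega)]
          have hk : (Pa ++ [b]).length - (m + 1) = Pa.length - m := by simp only [List.length_append, List.length_cons, List.length_nil]; omega
          rw [hk, List.take_append_of_le_length (by omega)]

theorem insert_neg_nat {α : Type} (xs : List α) (v : α) (m : Nat) (hm : 1 ≤ m) :
    PySem.List.insert xs (-(m : Int)) v = xs.take (xs.length - m) ++ v :: xs.drop (xs.length - m) := by
  have h : ((max (-(m:Int) + xs.length) 0)).toNat = xs.length - m := by omega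
  simp only [PySem.List.insert, PySem.List.sliceIndices]
  norm_num
  rw [if_pos (show 0 < m by omega), h]

theorem foldl_str_append {β : Type} (l : List β) (f : β → String) : ∀ (acc : String),
    (l.foldl (fun a i => a ++ f i) acc).toList = acc.toList ++ (l.map (fun i => (f i).toList)).flatten := by
  induction l with
  | nil => intro acc; simp
  | cons x t ih => intro acc; simp [ih, String.toList_append, List.append_assoc]

theorem foldl_str_append_nl (l : List String) : ∀ (acc : String),
    (l.foldl (fun a i => a ++ i ++ "\n") acc).toList = acc.toList ++ (l.map (fun i => i.toList ++ ['\n'])).flatten := by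
  induction l with
  | nil => intro acc; simp
  | cons x t ih =>
    intro acc
    simp [ih, String.toList_append, List.append_assoc]

theorem dropLast_flatten_join (xs : List (List Char)) (h : xs ≠ []) :
    ((xs.map (· ++ ['\n'])).flatten).dropLast = PySem.Chars.join ['\n'] xs := by
  induction xs with
  | nil => exact absurd rfl h
  | cons a t ih =>
    cases t with
    | nil => simp [PySem.Chars.join_singleton]
    | cons b t' =>
      have hne : ((b :: t').map (· ++ ['\n'])).flatten ≠ [] := by
        simp
      rw [List.map_cons, List.flatten_cons,
          List.dropLast_append_of_ne_nil hne, ih (by simp),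
          PySem.Chars.join_cons_cons]

theorem defineProgramEnv_eq (i p : Int) : defineProgramEnv i p = envLine i p ++ "\n" := by
  apply String.toList_inj.mp
  simp only [defineProgramEnv, envLine, String.toList_append, List.append_assoc]
  congr 11

-- A's programEnvs[0:-1] is exactly B's "\n".join block
theorem block_eq (p : Int) :
    PySem.Str.slice ((PySem.List.pyRange fxParamRange.1 fxParamRange.2 1).foldl
        (fun acc i => acc ++ defineProgramEnv i p) "") none (some (-1)) =
    PySem.Str.join "\n" ((PySem.List.pyRange 0 999 1).map (fun i => envLine i p)) := by
  apply String.toList_inj.mp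
  have hr : PySem.List.pyRange (0:Int) 999 1 ≠ [] := by
    rw [PySem.List.pyRange_one_cons (by norm_num)]
    simp
  rw [show fxParamRange.1 = (0:Int) from rfl, show fxParamRange.2 = (999:Int) from rfl]
  rw [PySem.Str.slice_to_neg_one, foldl_str_append _ (fun i => defineProgramEnv i p) ""]
  rw [List.map_congr_left (fun i _ => by
    rw [defineProgramEnv_eq i p, String.toList_append]
    rfl : ∀ i ∈ PySem.List.pyRange (0:Int) 999 1,
      (defineProgramEnv i p).toList = (envLine i p).toList ++ ['\n'])]
  rw [show (fun i => (envLine i p).toList ++ ['\n'])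
        = ((· ++ ['\n']) ∘ (fun i : Int => (envLine i p).toList)) from rfl]
  rw [← List.map_map]
  rw [show ("" : String).toList = ([] : List Char) from rfl, List.nil_append]
  rw [dropLast_flatten_join _ (by simpa using hr)]
  rw [PySem.Str.toList_join, List.map_map]
  rfl

-- core: inserting at -(m) into the split lines and rejoining = B's backward-scan splice
theorem main_core (s : String) (bS : String) (m : Nat) (hm : 1 ≤ m) :
    insertLineInString s (-(m : Int)) bS =
      (match findSplit s.toList.reverse 0 m with
       | some j => String.ofList (s.toList.take j) ++ "\n" ++ bS ++ "\n" ++ String.ofList (s.toList.drop (j + 1))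
       | none => bS ++ "\n" ++ s) := by
  rw [findSplit_eq m hm s.toList]
  apply String.toList_inj.mp
  simp only [insertLineInString]
  rw [show ("\n" : String).toList = ['\n'] from rfl]
  rw [splitOn_eq_splitNl]
  rw [insert_neg_nat _ _ m hm]
  rw [PySem.Str.slice_to_neg_one, foldl_str_append_nl]
  set P := splitNl s.toList with hP
  have hPne : P ≠ [] := splitNl_ne_nil _
  have hn : P.length ≠ 0 := by simpa [List.length_eq_zero_iff] using hPne
  set n := P.length with hn'
  rw [show ("" : String).toList = ([] : List Char) from rfl, List.nil_append]
  rw [List.length_map]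
  rw [List.map_append, List.map_cons, List.map_take, List.map_drop, List.map_map]
  rw [show ((fun i : String => i.toList ++ ['\n']) ∘ String.ofList)
        = (fun cs : List Char => cs ++ ['\n']) from by funext cs; simp]
  rw [show (List.take (n - m) (List.map (fun cs : List Char => cs ++ ['\n']) P)
        ++ (bS.toList ++ ['\n']) :: List.drop (n - m) (List.map (fun cs : List Char => cs ++ ['\n']) P))
      = List.map (fun cs : List Char => cs ++ ['\n']) (List.take (n - m) P ++ bS.toList :: List.drop (n - m) P) from by
    simp [List.map_take, List.map_drop]]
  rw [dropLast_flatten_join _ (by simp)]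
  by_cases hle : n ≤ m
  · rw [if_pos hle]
    have hk : n - m = 0 := by omega
    rw [hk, List.take_zero, List.drop_zero, List.nil_append]
    cases hp : P with
    | nil => exact absurd hp hPne
    | cons x xs =>
      rw [PySem.Chars.join_cons_cons]
      rw [← hp, hP, join_splitNl]
      simp [String.toList_append]
  · have hm' : m < n := by omega
    rw [if_neg hle]
    have htk : List.take (n - m) P ≠ [] := by
      have : (List.take (n - m) P).length = n - m := by
        rw [List.length_take]; omega
      intro hx; rw [hx] at this; simp at this; omega
    have hdr : List.drop (n - m) P ≠ [] := by
      have : (List.drop (n - m) P).length = m := by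
        rw [List.length_drop]; omega
      intro hx; rw [hx] at this; simp at this; omega
    -- decompose s.toList around the found index
    have hsplit : s.toList = PySem.Chars.join ['\n'] (P.take (n - m)) ++ '\n' ::
        PySem.Chars.join ['\n'] (P.drop (n - m)) := by
      have h2 := join_append ['\n'] (P.take (n - m)) (P.drop (n - m)) htk hdr
      rw [List.take_append_drop] at h2
      conv_lhs => rw [← join_splitNl s.toList, ← hP]
      rw [h2]
      simp
    set A := PySem.Chars.join ['\n'] (P.take (n - m)) with hA
    set C := PySem.Chars.join ['\n'] (P.drop (n - m)) with hC
    have htake : (s.toList).take A.length = A := by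
      rw [hsplit, List.take_append_of_le_length (le_refl _), List.take_length]
    have hdrop : (s.toList).drop (A.length + 1) = C := by
      rw [hsplit, show A.length + 1 = (A ++ ['\n']).length by simp]
      rw [show A ++ '\n' :: C = (A ++ ['\n']) ++ C by simp]
      rw [List.drop_left]
    simp only []
    rw [htake, hdrop]
    rw [join_append ['\n'] _ _ htk (by simp)]
    cases hd : List.drop (n - m) P with
    | nil => exact absurd hd hdr
    | cons y ys =>
      have hC' : C = PySem.Chars.join ['\n'] (y :: ys) := by rw [hC, hd]
      rw [PySem.Chars.join_cons_cons, hC']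
      simp [String.toList_append, List.append_assoc]
      exact hA.symm

theorem pyGet_neg2 (s : String) (h : 2 ≤ s.toList.length) : ∃ c, PySem.Str.pyGet? s (-2) = some c := by
  have hl : s.length = s.toList.length := String.length_toList.symm
  simp only [PySem.Str.pyGet?, PySem.Chars.pyGet?_eq_listPyGet?, PySem.List.pyGet?, PySem.List.pyIdx?]
  norm_num
  rw [if_pos (by omega : 2 ≤ s.length)]
  have hlt : s.length - Int.toNat 2 < s.toList.length := by omega
  exact ⟨_, by rw [Option.bind]; exact List.getElem?_eq_getElem hlt⟩

-- ===== VERDICT (by name: the statement is the Claim_ definition above) =====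
theorem addProgramEnvs_spec : Claim_equal_addProgramEnvs := by
  intro s p _ hpre
  unfold Spec_addProgramEnvs
  unfold addProgramEnvs addProgramEnvs_alt
  rw [show fxRange.1 = (0:Int) from rfl, show fxRange.2 = (16:Int) from rfl]
  by_cases hg : (p == (0:Int) || decide (p ≥ (16:Int))) = true
  · rw [if_pos hg, if_pos hg]
  · rw [if_neg hg, if_neg hg]
    have hlen : 2 ≤ s.toList.length := by
      rcases hpre with h0 | h16 | hl
      · exact absurd (by simp [h0]) hg
      · exact absurd (by simp; omega) hg
      · exact hl
    obtain ⟨c, hc⟩ := pyGet_neg2 s hlen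
    rw [hc]
    by_cases hcgt : c = '>'
    · subst hcgt
      simp only [reduceIte]
      rw [block_eq p]
      rw [show (-3 : Int) = -((3:Nat):Int) by norm_num]
      exact main_core s _ 3 (by norm_num)
    · simp only [Option.some.injEq, if_neg hcgt]
      rw [block_eq p]
      rw [show (-2 : Int) = -((2:Nat):Int) by norm_num]
      exact main_core s _ 2 (by norm_num)
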